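-- pv_equiv track=rewrite | github.com/abdi-awale-intel/osmosis-ctv-tool | src/index_ctv_backup.py | modify_tokens
-- ===== SOURCE A (Python) =====
-- def modify_tokens(tokens, status):
--     modified_tokens = []
--
--     for token in tokens:
--         # Split the token by '_'
--         parts = token.split('_')
--
--         # Insert 'Pass' or 'Fail' as the second-to-last entry
--         parts.insert(-1, status)
--
--         # Rejoin the parts using '_'
--         modified_token = '_'.join(parts)
--
--         # Add the modified token to the list
--         modified_tokens.append(modified_token)
--
--     return modified_tokens
-- ===== SOURCE B (Python) =====
-- def modify_tokens(tokens, status):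
--     def insert_status(token):
--         idx = token.rfind('_')
--         if idx == -1:
--             return status + '_' + token
--         return token[:idx] + '_' + status + token[idx:]
--     return [insert_status(token) for token in tokens]
-- ===== Notes on version B (the rewrite author's own statement) =====
-- stated objective: idiomatic
-- what changed: Replaces the split-into-parts / list.insert(-1) / join pipeline with a single rfind of the last underscore and two slices per token, never materialising a parts list, emitted via a list comprehension.
import Mathlib
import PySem

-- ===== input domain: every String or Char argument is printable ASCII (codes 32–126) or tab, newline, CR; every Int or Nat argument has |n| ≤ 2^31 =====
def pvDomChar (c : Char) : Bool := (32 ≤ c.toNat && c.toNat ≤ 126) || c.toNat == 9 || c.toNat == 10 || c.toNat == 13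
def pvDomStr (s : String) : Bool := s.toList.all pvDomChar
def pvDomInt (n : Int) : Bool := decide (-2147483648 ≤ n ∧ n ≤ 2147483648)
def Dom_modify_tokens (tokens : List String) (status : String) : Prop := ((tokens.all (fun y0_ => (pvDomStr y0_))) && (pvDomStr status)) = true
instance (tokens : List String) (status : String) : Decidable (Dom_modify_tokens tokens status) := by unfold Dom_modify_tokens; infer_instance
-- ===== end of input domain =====

-- B replaces A's split/insert(-1)/join pipeline by one rfind of the last underscore and two slices per token (objective: idiomatic; same cost).

-- ===== PORT A =====
def modify_tokens (tokens : List String) (status : String) : List String :=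
  tokens.foldl (fun modified_tokens token =>
    -- parts = token.split('_');  sep "_" is non-empty so split? never raises
    let parts := (PySem.Str.split? token "_").getD []
    -- parts.insert(-1, status)
    let parts := PySem.List.insert parts (-1) status
    -- modified_token = '_'.join(parts)
    let modified_token := PySem.Str.join "_" parts
    modified_tokens ++ [modified_token]) []

-- ===== PORT B =====
def insert_status (status : String) (token : String) : String :=
  let idx := PySem.Str.rfind token "_"
  if idx = -1 then status ++ "_" ++ token
  else PySem.Str.slice token none (some idx) ++ "_" ++ status ++ PySem.Str.slice token (some idx) none

def modify_tokens_alt (tokens : List String) (status : String) : List String :=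
  tokens.map (insert_status status)

-- ===== PRECONDITION & SPEC =====
def Spec_modify_tokens (tokens : List String) (status : String) (out : List String) : Prop := out = modify_tokens_alt tokens status
instance (tokens : List String) (status : String) (out : List String) : Decidable (Spec_modify_tokens tokens status out) := by unfold Spec_modify_tokens; infer_instance

-- ===== CLAIM (what is proved, stated in full; the proofs are below) =====
def Claim_equal_modify_tokens : Prop := ∀ (tokens : List String) (status : String), Dom_modify_tokens tokens status → Spec_modify_tokens tokens status (modify_tokens tokens status)

-- ===== LEMMAS AND PROOFS =====

def split1 (cs : List Char) : List (List Char) :=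
  match cs with
  | [] => [[]]
  | c :: rest => if c = '_' then [] :: split1 rest else (split1 rest).modifyHead (c :: ·)

def rfind1 (cs : List Char) : Int :=
  match cs with
  | [] => -1
  | c :: rest => if rfind1 rest = -1 then (if c = '_' then 0 else -1) else rfind1 rest + 1

theorem split1_ne_nil (cs : List Char) : split1 cs ≠ [] := by
  induction cs with
  | nil => simp [split1]
  | cons c rest ih =>
    simp only [split1]
    split
    · simp
    · cases h : split1 rest with
      | nil => exact absurd h ih
      | cons a l => simp

theorem rfind1_nonneg {cs : List Char} (h : rfind1 cs ≠ -1) : 0 ≤ rfind1 cs := by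
  induction cs with
  | nil => simp [rfind1] at h
  | cons c rest ih =>
    by_cases hr : rfind1 rest = -1
    · by_cases hc : c = '_'
      · simp [rfind1, hr, hc]
      · simp [rfind1, hr, hc] at h
    · have := ih hr; simp only [rfind1, if_neg hr]; omega

theorem split1_of_neg {cs : List Char} (h : rfind1 cs = -1) : split1 cs = [cs] := by
  induction cs with
  | nil => simp [split1]
  | cons c rest ih =>
    simp only [rfind1] at h
    by_cases hr : rfind1 rest = -1
    · simp only [hr] at h
      by_cases hc : c = '_'
      · simp [hc] at h
      · simp only [split1, if_neg hc, ih hr, List.modifyHead]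
    · exfalso; have := rfind1_nonneg hr; simp only [if_neg hr] at h; omega

theorem split1_two_le {cs : List Char} (h : rfind1 cs ≠ -1) : 2 ≤ (split1 cs).length := by
  induction cs with
  | nil => simp [rfind1] at h
  | cons c rest ih =>
    by_cases hc : c = '_'
    · have := split1_ne_nil rest
      simp only [split1, if_pos hc, List.length_cons]
      cases hs : split1 rest with
      | nil => exact absurd hs this
      | cons a l => simp
    · simp only [rfind1, if_neg hc] at h
      by_cases hr : rfind1 rest = -1
      · simp [hr] at h
      · have := ih hr
        simp only [split1, if_neg hc, List.length_modifyHead]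
        exact this

theorem splitOn_go_nil (sep fuel cur acc) :
    PySem.Chars.splitOn.go sep (fuel + 1) [] cur acc = (cur.reverse :: acc).reverse := rfl

theorem splitOn_go_cons (sep fuel c rest cur acc) :
    PySem.Chars.splitOn.go sep (fuel + 1) (c :: rest) cur acc =
      if sep.isPrefixOf (c :: rest) then
        PySem.Chars.splitOn.go sep fuel (List.drop sep.length (c :: rest)) [] (cur.reverse :: acc)
      else PySem.Chars.splitOn.go sep fuel rest (c :: cur) acc := rfl

theorem splitOn_go_spec : ∀ (fuel : Nat) (l cur : List Char) (acc : List (List Char)),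
    l.length < fuel →
    PySem.Chars.splitOn.go ['_'] fuel l cur acc =
      acc.reverse ++ (split1 l).modifyHead (cur.reverse ++ ·) := by
  intro fuel
  induction fuel with
  | zero => intro l cur acc h; omega
  | succ fuel ih =>
    intro l cur acc h
    cases l with
    | nil => simp [splitOn_go_nil, split1]
    | cons c rest =>
      rw [splitOn_go_cons]
      by_cases hc : c = '_'
      · have hp : List.isPrefixOf ['_'] (c :: rest) = true := by simp [List.isPrefixOf, hc]
        rw [if_pos hp]
        simp only [List.length_cons] at h
        rw [ih _ _ _ (by simpa using h)]
        have hne := split1_ne_nil rest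
        cases hs : split1 rest with
        | nil => exact absurd hs hne
        | cons a l' => simp [split1, hc, hs]
      · have hp : List.isPrefixOf ['_'] (c :: rest) = false := by simp [List.isPrefixOf]; exact fun e => hc e.symm
        rw [if_neg (by simp [hp])]
        simp only [List.length_cons] at h
        rw [ih _ _ _ (by omega)]
        have hne := split1_ne_nil rest
        cases hs : split1 rest with
        | nil => exact absurd hs hne
        | cons a l' => simp [split1, hc, hs]

theorem splitOn_eq_split1 (cs : List Char) : PySem.Chars.splitOn cs ['_'] = split1 cs := by
  unfold PySem.Chars.splitOn
  rw [splitOn_go_spec (cs.length + 1) cs [] [] (by omega)]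
  have hne := split1_ne_nil cs
  cases hs : split1 cs with
  | nil => exact absurd hs hne
  | cons a l' => simp

theorem rfind_go_zero (s sub) :
    PySem.Chars.rfind.go s sub 0 = if sub.isPrefixOf s then 0 else -1 := rfl

theorem rfind_go_succ (s sub j) :
    PySem.Chars.rfind.go s sub (j + 1) =
      if sub.isPrefixOf (List.drop (j + 1) s) then ((j : Int) + 1) else PySem.Chars.rfind.go s sub j := rfl

theorem rfind_go_cons (c : Char) (s : List Char) : ∀ (j : Nat), j ≤ s.length →
    PySem.Chars.rfind.go (c :: s) ['_'] (j + 1) =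
      if PySem.Chars.rfind.go s ['_'] j = -1 then (if c = '_' then 0 else -1)
      else PySem.Chars.rfind.go s ['_'] j + 1 := by
  intro j
  induction j with
  | zero =>
    intro _
    rw [rfind_go_succ (c :: s) ['_'] 0, rfind_go_zero s ['_']]
    simp only [List.drop_one, List.tail_cons, Nat.cast_zero, zero_add]
    by_cases hp : List.isPrefixOf ['_'] s = true
    · simp [hp]
    · simp only [Bool.not_eq_true] at hp
      rw [if_neg (by simp [hp]), if_pos (by simp [hp]), rfind_go_zero]
      by_cases hc : c = '_'
      · rw [if_pos (by simp [List.isPrefixOf, hc]), if_pos hc]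
      · rw [if_neg (by simp [List.isPrefixOf]; exact fun e => hc e.symm), if_neg hc]
  | succ j ih =>
    intro hj
    rw [rfind_go_succ (c :: s) ['_'] (j + 1), rfind_go_succ s ['_'] j]
    have hd : List.drop (j + 1 + 1) (c :: s) = List.drop (j + 1) s := by simp
    rw [hd]
    by_cases hp : List.isPrefixOf ['_'] (List.drop (j + 1) s) = true
    · rw [if_pos hp, if_pos hp, if_neg (by omega)]
      push_cast; ring
    · simp only [Bool.not_eq_true] at hp
      simp only [hp, Bool.false_eq_true, if_false]
      exact ih (by omega)

theorem rfind_eq_rfind1 (cs : List Char) : PySem.Chars.rfind cs ['_'] = rfind1 cs := by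
  induction cs with
  | nil => rfl
  | cons c rest ih =>
    show PySem.Chars.rfind.go (c :: rest) ['_'] (rest.length + 1) = _
    rw [rfind_go_cons c rest rest.length le_rfl]
    have : PySem.Chars.rfind.go rest ['_'] rest.length = rfind1 rest := ih
    rw [this]
    rfl

theorem ins_neg_one {α : Type} (ps : List α) (v : α) (h : ps ≠ []) :
    PySem.List.insert ps (-1) v = ps.dropLast ++ v :: [ps.getLastD v] := by
  have hn : 0 < ps.length := List.length_pos_of_ne_nil h
  simp only [PySem.List.insert, PySem.List.sliceIndices]
  norm_num
  have hk : (max (-1 + (ps.length : Int)) 0).toNat = ps.length - 1 := by omega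
  rw [hk, ← List.dropLast_eq_take, List.drop_length_sub_one h]
  rw [List.getLast?_eq_some_getLast h]
  rfl

theorem map_insert {α β : Type} (f : α → β) (ps : List α) (i : Int) (v : α) :
    (PySem.List.insert ps i v).map f = PySem.List.insert (ps.map f) i (f v) := by
  unfold PySem.List.insert
  simp [List.map_take, List.map_drop]

theorem join_cons_ne (x : List Char) {ys : List (List Char)} (h : ys ≠ []) :
    PySem.Chars.join ['_'] (x :: ys) = x ++ '_' :: PySem.Chars.join ['_'] ys := by
  cases ys with
  | nil => exact absurd rfl h
  | cons y t => rw [PySem.Chars.join_cons_cons]; simp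

theorem getLastD_congr {α : Type} {l : List α} (h : l ≠ []) (a b : α) : l.getLastD a = l.getLastD b := by
  rw [List.getLastD_eq_getLast?, List.getLastD_eq_getLast?, List.getLast?_eq_some_getLast h]
  rfl

theorem master (s : List Char) : ∀ (t : List Char),
    PySem.Chars.join ['_'] ((split1 t).dropLast ++ s :: [(split1 t).getLastD s]) =
      (if rfind1 t = -1 then s ++ '_' :: t
       else t.take (rfind1 t).toNat ++ '_' :: (s ++ t.drop (rfind1 t).toNat)) := by
  intro t
  induction t with
  | nil =>
    simp [split1, rfind1, PySem.Chars.join_cons_cons, PySem.Chars.join_singleton]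
  | cons c rest ih =>
    have hne := split1_ne_nil rest
    by_cases hc : c = '_'
    · subst hc
      have hd : (split1 ('_' :: rest)).dropLast = [] :: (split1 rest).dropLast := by
        rw [show split1 ('_' :: rest) = [] :: split1 rest from by simp [split1]]
        exact List.dropLast_cons_of_ne_nil hne
      have hl : (split1 ('_' :: rest)).getLastD s = (split1 rest).getLastD s := by
        rw [show split1 ('_' :: rest) = [] :: split1 rest from by simp [split1]]
        rw [List.getLastD_cons]
        exact getLastD_congr hne _ _
      rw [hd, hl, List.cons_append, join_cons_ne _ (by simp)]
      rw [ih]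
      by_cases hr : rfind1 rest = -1
      · simp [rfind1, hr]
      · have h0 := rfind1_nonneg hr
        rw [if_neg hr]
        rw [show rfind1 ('_' :: rest) = rfind1 rest + 1 from by simp [rfind1, hr]]
        rw [if_neg (by omega)]
        have ht : (rfind1 rest + 1).toNat = (rfind1 rest).toNat + 1 := by omega
        rw [ht, List.take_succ_cons, List.drop_succ_cons]
        simp
    · by_cases hr : rfind1 rest = -1
      · have hs1 : split1 rest = [rest] := split1_of_neg hr
        rw [show split1 (c :: rest) = [c :: rest] from by simp [split1, hc, hs1]]
        rw [show rfind1 (c :: rest) = -1 from by simp [rfind1, hr, hc]]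
        simp [PySem.Chars.join_cons_cons, PySem.Chars.join_singleton]
      · have h0 := rfind1_nonneg hr
        have h2 := split1_two_le hr
        cases hs : split1 rest with
        | nil => exact absurd hs hne
        | cons p ps' =>
          cases ps' with
          | nil => rw [hs] at h2; simp at h2
          | cons q t' =>
            have hsp : split1 (c :: rest) = (c :: p) :: q :: t' := by
              simp [split1, hc, hs]
            rw [hsp]
            rw [List.dropLast_cons_of_ne_nil (by simp), List.getLastD_cons]
            rw [hs] at ih
            rw [List.dropLast_cons_of_ne_nil (by simp), List.getLastD_cons] at ih
            rw [getLastD_congr (l := q :: t') (by simp) (c :: p) p]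
            rw [List.cons_append, join_cons_ne _ (by simp), List.cons_append]
            rw [List.cons_append] at ih
            rw [join_cons_ne _ (by simp)] at ih
            rw [ih]
            rw [show rfind1 (c :: rest) = rfind1 rest + 1 from by simp [rfind1, hr]]
            rw [if_neg hr, if_neg (by omega)]
            have ht : (rfind1 rest + 1).toNat = (rfind1 rest).toNat + 1 := by omega
            rw [ht, List.take_succ_cons, List.drop_succ_cons]
            simp

theorem tok_eq (status token : String) :
    PySem.Str.join "_" (PySem.List.insert ((PySem.Str.split? token "_").getD []) (-1) status) =
      insert_status status token := by
  apply String.toList_inj.mp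
  have hne := split1_ne_nil token.toList
  have hsplit : (PySem.Str.split? token "_").getD [] = (split1 token.toList).map String.ofList := by
    unfold PySem.Str.split? PySem.Chars.split?
    rw [show ("_" : String).toList = ['_'] from rfl]
    rw [if_neg (by simp)]
    rw [splitOn_eq_split1]
    rfl
  rw [hsplit]
  rw [PySem.Str.toList_join, map_insert]
  rw [show ((split1 token.toList).map String.ofList).map String.toList = split1 token.toList from by
    simp [List.map_map, Function.comp_def]]
  rw [ins_neg_one _ _ hne]
  rw [show ("_" : String).toList = ['_'] from rfl]
  rw [master]
  unfold insert_status
  rw [show PySem.Str.rfind token "_" = rfind1 token.toList from by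
    rw [show PySem.Str.rfind token "_" = PySem.Chars.rfind token.toList ['_'] from rfl]
    exact rfind_eq_rfind1 _]
  by_cases hr : rfind1 token.toList = -1
  · rw [if_pos hr, if_pos hr]
    simp [String.toList_append]
  · have h0 := rfind1_nonneg hr
    rw [if_neg hr, if_neg hr]
    simp only [String.toList_append, PySem.Str.toList_slice, PySem.Chars.slice]
    rw [PySem.List.slice_to _ h0, PySem.List.slice_from _ h0]
    rw [show ("_" : String).toList = ['_'] from rfl]
    simp

-- ===== VERDICT (by name: the statement is the Claim_ definition above) =====
theorem modify_tokens_spec : Claim_equal_modify_tokens := by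
  intro tokens status _
  unfold Spec_modify_tokens modify_tokens modify_tokens_alt
  rw [PySem.List.foldl_append_singleton_eq_map]
  exact List.map_congr_left (fun token _ => tok_eq status token)
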